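-- pv_equiv track=rewrite | github.com/ksayee/programming_assignments | python/CodingExercises/LeetCode1291.py | LeetCode1291
-- ===== SOURCE A (Python) =====
-- def LeetCode1291(low,high):
--
--     output_lst=[]
--     while low<=high:
--         num=low
--         if len(str(num))!=len(set(str(num))):
--             pass
--         else:
--             tmp=[]
--             flg=True
--             while num!=0:
--                 rem=num%10
--                 tmp.append(rem)
--                 num=num//10
--             tmp.reverse()
--             for i in range(1,len(tmp)):
--                 if tmp[i]-1!=tmp[i-1]:
--                     flg=False
--                     break
--             if flg==True:
--                 output_lst.append(low)
--         low=low+1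
--     return output_lst
-- ===== SOURCE B (Python) =====
-- def LeetCode1291(low, high):
--     s = "123456789"
--     cands = []
--     for length in range(1, 10):
--         for start in range(0, 10 - length):
--             cands.append(int(s[start:start + length]))
--     return sorted(n for n in cands if low <= n <= high)
-- ===== Notes on version B (the rewrite author's own statement) =====
-- stated objective: faster
-- what changed: Instead of scanning every integer in [low,high] and checking its digits, B generates the 45 substrings of '123456789' (the only candidates), filters them to the range and sorts.
-- intended difference: When low = 0 and high >= 0, A returns a list starting with 0 (its digit-chain check is vacuous for 0) while B omits 0, the intended behaviour since 0 is not a sequential-digit number (LeetCode 1291 assumes low >= 10). — e.g. on LeetCode1291(0, 1): A returns [0, 1], B returns [1]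
-- outside the precondition, e.g. on LeetCode1291(-11, -11): A returns [], B returns []
import Mathlib
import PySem

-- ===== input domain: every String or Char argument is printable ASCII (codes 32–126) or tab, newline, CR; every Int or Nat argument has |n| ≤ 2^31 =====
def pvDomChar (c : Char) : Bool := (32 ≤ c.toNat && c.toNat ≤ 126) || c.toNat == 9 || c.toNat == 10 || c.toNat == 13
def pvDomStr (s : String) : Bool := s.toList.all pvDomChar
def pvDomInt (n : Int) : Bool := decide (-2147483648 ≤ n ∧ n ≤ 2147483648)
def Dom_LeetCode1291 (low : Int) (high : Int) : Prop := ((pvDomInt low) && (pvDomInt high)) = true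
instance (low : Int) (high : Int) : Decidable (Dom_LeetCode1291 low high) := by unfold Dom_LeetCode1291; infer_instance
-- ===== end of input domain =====

-- B replaces A's scan of every integer in [low, high] (digit-checking each one) by generating the
-- 45 substrings of "123456789" — the only sequential-digit candidates — filtering them to the range
-- and sorting: objective 'faster' (work independent of high - low).

-- ===== PORT A =====
-- Python 'while num != 0: rem = num % 10; tmp.append(rem); num = num // 10', fuel-totalised:
-- for num ≥ 0 the fuel num.toNat bounds the iteration count, so the port is exact there;
-- for num < 0 the Python loop never terminates (num // 10 stalls at -1) — excluded by Pre_.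
def pvDigitsAux : Nat → Int → List Int
  | 0, _ => []
  | f + 1, num =>
      if num ≤ 0 then []
      else PySem.Int.mod num 10 :: pvDigitsAux f (PySem.Int.floordiv num 10)

def pvDigits (num : Int) : List Int := pvDigitsAux num.toNat num

def LeetCode1291 (low : Int) (high : Int) : List Int :=
  -- 'while low <= high: … low = low + 1' = for lw in range(low, high+1)
  (PySem.List.pyRange low (high + 1) 1).foldl
    (fun output_lst lw =>
      if (PySem.Int.toChars lw).length ≠ (PySem.Set.ofList (PySem.Int.toChars lw)).length then
        output_lst
      else
        let tmp := (pvDigits lw).reverse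
        -- 'for i in range(1, len(tmp)): if tmp[i]-1 != tmp[i-1]: flg = False; break'
        -- (the break only skips further iterations of a pure loop whose flag is sticky-false)
        let flg := (PySem.List.pyRange 1 (tmp.length : Int) 1).foldl
          (fun flg i =>
            if PySem.List.pyGetD tmp i 0 - 1 ≠ PySem.List.pyGetD tmp (i - 1) 0 then false else flg)
          true
        if flg then output_lst ++ [lw] else output_lst)
    []

-- ===== PORT B =====
def LeetCode1291_alt (low : Int) (high : Int) : List Int :=
  let s := "123456789".toList
  let cands := (PySem.List.pyRange 1 10 1).foldl
    (fun acc len =>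
      (PySem.List.pyRange 0 (10 - len) 1).foldl
        (fun acc2 start =>
          -- int(s[start:start+length]); the substring is always a nonempty digit string, so
          -- int() never raises and the .getD 0 default is never taken
          acc2 ++ [(PySem.Int.ofChars? (PySem.List.slice s (some start) (some (start + len)))).getD 0])
        acc)
    []
  PySem.List.sorted (cands.filter (fun n => decide (low ≤ n) && decide (n ≤ high))) (fun x => x) false

-- ===== PRECONDITION & SPEC =====
-- Pre_ excludes nonempty ranges that start below 0: there A's inner digit loop runs forever as soon
-- as the scan reaches a negative number whose decimal string has pairwise-distinct characters
-- (e.g. -1, -10), which excludes with it the few all-repeated-digit negative ranges such as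
-- (-11, -11) on which A happens to return [].
def Pre_LeetCode1291 (low : Int) (high : Int) : Prop := high < low ∨ 0 ≤ low
instance (low : Int) (high : Int) : Decidable (Pre_LeetCode1291 low high) := by
  unfold Pre_LeetCode1291; infer_instance

def pvWitness_LeetCode1291 : Int × Int := (10, 100)

-- When low = 0 and 0 ≤ high, A returns a list starting with 0 (its digit-chain check is vacuous
-- for 0) while B omits 0 — the intended behaviour, since 0 is not a sequential-digit number.
def D_LeetCode1291 (low : Int) (high : Int) : Prop := low = 0 ∧ 0 ≤ high
instance (low : Int) (high : Int) : Decidable (D_LeetCode1291 low high) := by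
  unfold D_LeetCode1291; infer_instance

def Spec_LeetCode1291 (low : Int) (high : Int) (out : List Int) : Prop :=
  ¬ D_LeetCode1291 low high → out = LeetCode1291_alt low high
instance (low : Int) (high : Int) (out : List Int) : Decidable (Spec_LeetCode1291 low high out) := by
  unfold Spec_LeetCode1291; infer_instance

def pvDiffWitness_LeetCode1291 : Int × Int := (0, 1)
def pvDiffWitnessOut_LeetCode1291 : (List Int) × (List Int) := ([0, 1], [1])

-- ===== CLAIM (what is proved, stated in full; the proofs are below) =====
def Claim_unchanged_LeetCode1291 : Prop := ∀ (low : Int) (high : Int), Dom_LeetCode1291 low high → Pre_LeetCode1291 low high → Spec_LeetCode1291 low high (LeetCode1291 low high)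
def Claim_changed_LeetCode1291 : Prop := Dom_LeetCode1291 (pvDiffWitness_LeetCode1291.1) (pvDiffWitness_LeetCode1291.2) ∧ Pre_LeetCode1291 (pvDiffWitness_LeetCode1291.1) (pvDiffWitness_LeetCode1291.2) ∧ D_LeetCode1291 (pvDiffWitness_LeetCode1291.1) (pvDiffWitness_LeetCode1291.2) ∧ LeetCode1291 (pvDiffWitness_LeetCode1291.1) (pvDiffWitness_LeetCode1291.2) = pvDiffWitnessOut_LeetCode1291.1 ∧ LeetCode1291_alt (pvDiffWitness_LeetCode1291.1) (pvDiffWitness_LeetCode1291.2) = pvDiffWitnessOut_LeetCode1291.2 ∧ pvDiffWitnessOut_LeetCode1291.1 ≠ pvDiffWitnessOut_LeetCode1291.2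
def Claim_exact_LeetCode1291 : Prop := ∀ (low : Int) (high : Int), Dom_LeetCode1291 low high → Pre_LeetCode1291 low high → D_LeetCode1291 low high → LeetCode1291 low high ≠ LeetCode1291_alt low high

-- ===== LEMMAS AND PROOFS =====

-- the 45 sequential-digit numbers, in increasing order
def pvClit : List Int :=
  [1, 2, 3, 4, 5, 6, 7, 8, 9,
   12, 23, 34, 45, 56, 67, 78, 89,
   123, 234, 345, 456, 567, 678, 789,
   1234, 2345, 3456, 4567, 5678, 6789,
   12345, 23456, 34567, 45678, 56789,
   123456, 234567, 345678, 456789,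
   1234567, 2345678, 3456789,
   12345678, 23456789,
   123456789]

-- A's per-number test, extracted from the loop body
def pvChain (tmp : List Int) : Bool :=
  (PySem.List.pyRange 1 (tmp.length : Int) 1).foldl
    (fun flg i =>
      if PySem.List.pyGetD tmp i 0 - 1 ≠ PySem.List.pyGetD tmp (i - 1) 0 then false else flg)
    true

def pvA (x : Int) : Bool :=
  if (PySem.Int.toChars x).length ≠ (PySem.Set.ofList (PySem.Int.toChars x)).length then false
  else pvChain ((pvDigits x).reverse)

theorem pvDigitsAux_fuel : ∀ (f g : Nat) (num : Int), 0 ≤ num → num.toNat ≤ f → num.toNat ≤ g →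
    pvDigitsAux f num = pvDigitsAux g num := by
  intro f
  induction f with
  | zero =>
    intro g num h0 hf _
    have : num = 0 := by omega
    subst this
    cases g <;> simp [pvDigitsAux]
  | succ f ih =>
    intro g num h0 hf hg
    by_cases hz : num ≤ 0
    · have : num = 0 := by omega
      subst this
      cases g <;> simp [pvDigitsAux]
    · replace hz : 0 < num := by omega
      obtain ⟨g', rfl⟩ : ∃ g', g = g' + 1 := ⟨g - 1, by omega⟩
      simp only [pvDigitsAux, if_neg (by omega : ¬ num ≤ 0)]
      rw [PySem.Int.floordiv_eq_ediv_of_pos (by norm_num)]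
      have hlt : (num / 10).toNat ≤ f ∧ (num / 10).toNat ≤ g' := by omega
      rw [ih g' (num / 10) (by positivity) hlt.1 hlt.2]

theorem pvDigits_pos {num : Int} (h : 0 < num) :
    pvDigits num = PySem.Int.mod num 10 :: pvDigits (PySem.Int.floordiv num 10) := by
  unfold pvDigits
  obtain ⟨f, hf⟩ : ∃ f, num.toNat = f + 1 := ⟨num.toNat - 1, by omega⟩
  rw [hf]
  simp only [pvDigitsAux, if_neg (by omega : ¬ num ≤ 0)]
  congr 1
  apply pvDigitsAux_fuel
  · rw [PySem.Int.floordiv_eq_ediv_of_pos (by norm_num)]; omega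
  · rw [PySem.Int.floordiv_eq_ediv_of_pos (by norm_num)]
    omega
  · omega

theorem pvChain_iff (L : List Int) : pvChain L = true ↔
    ∀ k : Nat, 1 ≤ k → k < L.length → L.getD k 0 - 1 = L.getD (k - 1) 0 := by
  unfold pvChain
  have h1 : (PySem.List.pyRange 1 (L.length : Int) 1).foldl
      (fun flg i =>
        if PySem.List.pyGetD L i 0 - 1 ≠ PySem.List.pyGetD L (i - 1) 0 then false else flg) true
      = (PySem.List.pyRange 1 (L.length : Int) 1).foldl
        (fun flg i =>
          if (fun i => decide (PySem.List.pyGetD L i 0 - 1 ≠ PySem.List.pyGetD L (i - 1) 0)) i = true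
          then false else flg) true := by
    apply PySem.List.foldl_congr_mem
    intro acc x hx
    by_cases h : PySem.List.pyGetD L x 0 - 1 ≠ PySem.List.pyGetD L (x - 1) 0 <;> simp [h]
  rw [h1, PySem.List.foldl_if_false_eq]
  simp only [Bool.true_and, Bool.not_eq_eq_eq_not, Bool.not_true, List.any_eq_false]
  constructor
  · intro h k hk1 hk2
    have := h (k : Int) (PySem.List.mem_pyRange_one.mpr ⟨by exact_mod_cast hk1, by exact_mod_cast hk2⟩)
    simp only [decide_eq_true_eq, not_not] at this
    have e1 : PySem.List.pyGetD L (k : Int) 0 = L.getD k 0 := PySem.List.pyGetD_natCast L k 0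
    have e2 : ((k : Int) - 1) = ((k - 1 : Nat) : Int) := by omega
    rw [e1, e2, PySem.List.pyGetD_natCast] at this
    exact this
  · intro h i hi
    obtain ⟨hi1, hi2⟩ := PySem.List.mem_pyRange_one.mp hi
    obtain ⟨k, rfl⟩ : ∃ k : Nat, i = (k : Int) := ⟨i.toNat, by omega⟩
    simp only [decide_eq_true_eq, not_not]
    have e2 : ((k : Int) - 1) = ((k - 1 : Nat) : Int) := by omega
    rw [PySem.List.pyGetD_natCast, e2, PySem.List.pyGetD_natCast]
    exact h k (by exact_mod_cast hi1) (by exact_mod_cast hi2)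

theorem pvChain_step {x : Int} (hx : 10 ≤ x)
    (h : pvChain ((pvDigits x).reverse) = true) :
    pvChain ((pvDigits (PySem.Int.floordiv x 10)).reverse) = true ∧
    PySem.Int.mod x 10 = PySem.Int.mod (PySem.Int.floordiv x 10) 10 + 1 := by
  have hq1 : 1 ≤ PySem.Int.floordiv x 10 := by
    rw [PySem.Int.floordiv_eq_ediv_of_pos (by norm_num : (0:Int) < 10)]; omega
  have hdx : pvDigits x = PySem.Int.mod x 10 :: pvDigits (PySem.Int.floordiv x 10) :=
    pvDigits_pos (by omega)
  obtain ⟨m, t, hdq⟩ : ∃ m t, pvDigits (PySem.Int.floordiv x 10) = m :: t :=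
    ⟨_, _, pvDigits_pos (by omega)⟩
  have hm : m = PySem.Int.mod (PySem.Int.floordiv x 10) 10 := by
    have := pvDigits_pos (show (0:Int) < PySem.Int.floordiv x 10 by omega)
    rw [hdq] at this
    exact (List.cons.injEq _ _ _ _ ▸ this).1
  have hLx : (pvDigits x).reverse = (t.reverse ++ [m]) ++ [PySem.Int.mod x 10] := by
    rw [hdx, hdq]; simp
  rw [hLx, pvChain_iff] at h
  have hlen : (t.reverse ++ [m]).length = t.length + 1 := by simp
  constructor
  · rw [hdq, List.reverse_cons, pvChain_iff]
    intro k hk1 hk2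
    have h3 := h k hk1 (by simp at hk2 ⊢; omega)
    rwa [List.getD_append (t.reverse ++ [m]) [PySem.Int.mod x 10] 0 k (by omega),
         List.getD_append (t.reverse ++ [m]) [PySem.Int.mod x 10] 0 (k-1) (by omega)] at h3
  · have h3 := h (t.length + 1) (by omega) (by simp)
    have e1 : ((t.reverse ++ [m]) ++ [PySem.Int.mod x 10]).getD (t.length + 1) 0
        = PySem.Int.mod x 10 := by
      rw [List.getD_append_right (t.reverse ++ [m]) [PySem.Int.mod x 10] 0 (t.length + 1) (by omega)]
      simp [hlen]
    have e2 : ((t.reverse ++ [m]) ++ [PySem.Int.mod x 10]).getD (t.length + 1 - 1) 0 = m := by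
      rw [List.getD_append (t.reverse ++ [m]) [PySem.Int.mod x 10] 0 (t.length + 1 - 1) (by omega)]
      rw [List.getD_append_right t.reverse [m] 0 (t.length + 1 - 1) (by simp)]
      simp
    rw [e1, e2] at h3
    omega

theorem pvStep : ∀ q ∈ pvClit, PySem.Int.mod q 10 + 1 < 10 →
    q * 10 + (PySem.Int.mod q 10 + 1) ∈ pvClit := by decide

theorem pvChain_mem : ∀ (n : Nat) (x : Int), x.toNat ≤ n → 1 ≤ x →
    pvChain ((pvDigits x).reverse) = true → x ∈ pvClit := by
  intro n
  induction n with
  | zero => intro x h1 h2 _; omega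
  | succ n ih =>
    intro x h1 h2 hch
    by_cases hx9 : x ≤ 9
    · interval_cases x <;> decide
    · have hx10 : 10 ≤ x := by omega
      obtain ⟨hch', hr⟩ := pvChain_step hx10 hch
      have hq1 : 1 ≤ PySem.Int.floordiv x 10 := by
        rw [PySem.Int.floordiv_eq_ediv_of_pos (by norm_num)]; omega
      have hqn : (PySem.Int.floordiv x 10).toNat ≤ n := by
        rw [PySem.Int.floordiv_eq_ediv_of_pos (by norm_num)]
        omega
      have hmem := ih _ hqn hq1 hch'
      have hrlt : PySem.Int.mod x 10 < 10 := PySem.Int.mod_lt x (by norm_num)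
      have hxeq : x = PySem.Int.floordiv x 10 * 10 + (PySem.Int.mod (PySem.Int.floordiv x 10) 10 + 1) := by
        have := PySem.Int.floordiv_mul_add_mod x 10
        omega
      rw [hxeq]
      exact pvStep _ hmem (by omega)

theorem pvA_mem_clit (x : Int) (hx : 1 ≤ x) (h : pvA x = true) : x ∈ pvClit := by
  apply pvChain_mem x.toNat x (le_refl _) hx
  unfold pvA at h
  split_ifs at h
  exact h

theorem pvClit_pvA : ∀ x ∈ pvClit, pvA x = true := by decide

theorem pvA_eq_filter (low high : Int) :
    LeetCode1291 low high = (PySem.List.pyRange low (high + 1) 1).filter pvA := by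
  unfold LeetCode1291
  have h1 : (PySem.List.pyRange low (high + 1) 1).foldl
      (fun output_lst lw =>
        if (PySem.Int.toChars lw).length ≠ (PySem.Set.ofList (PySem.Int.toChars lw)).length then
          output_lst
        else
          let tmp := (pvDigits lw).reverse
          let flg := (PySem.List.pyRange 1 (tmp.length : Int) 1).foldl
            (fun flg i =>
              if PySem.List.pyGetD tmp i 0 - 1 ≠ PySem.List.pyGetD tmp (i - 1) 0 then false else flg)
            true
          if flg then output_lst ++ [lw] else output_lst) []
      = (PySem.List.pyRange low (high + 1) 1).foldl
          (fun acc x => if pvA x then acc ++ [x] else acc) [] := by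
    apply PySem.List.foldl_congr_mem
    intro acc x hx
    simp only [pvA, pvChain]
    split_ifs <;> first | rfl | contradiction
  rw [h1, PySem.List.foldl_append_if_eq_filter]
  simp

theorem pvAlt_eq_filter (low high : Int) :
    LeetCode1291_alt low high = pvClit.filter (fun n => decide (low ≤ n) && decide (n ≤ high)) := by
  have hc : ((PySem.List.pyRange 1 10 1).foldl
    (fun acc len =>
      (PySem.List.pyRange 0 (10 - len) 1).foldl
        (fun acc2 start =>
          acc2 ++ [(PySem.Int.ofChars? (PySem.List.slice "123456789".toList (some start) (some (start + len)))).getD 0])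
        acc)
    []) = pvClit := by decide
  show PySem.List.sorted (List.filter _ ((PySem.List.pyRange 1 10 1).foldl
    (fun acc len =>
      (PySem.List.pyRange 0 (10 - len) 1).foldl
        (fun acc2 start =>
          acc2 ++ [(PySem.Int.ofChars? (PySem.List.slice "123456789".toList (some start) (some (start + len)))).getD 0])
        acc)
    [])) (fun x => x) false = _
  rw [hc]
  exact PySem.List.sorted_eq_of_perm_of_pairwise_lt _ _ _ (List.Perm.refl _)
    (List.Pairwise.filter _ (by decide))

theorem pvMain {low high : Int} (hlow : 1 ≤ low) :
    (PySem.List.pyRange low (high + 1) 1).filter pvA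
      = pvClit.filter (fun n => decide (low ≤ n) && decide (n ≤ high)) := by
  have hpw1 : ((PySem.List.pyRange low (high + 1) 1).filter pvA).Pairwise (· < ·) :=
    List.Pairwise.filter _ (PySem.List.pairwise_lt_pyRange_one low (high + 1))
  have hpw2 : (pvClit.filter (fun n => decide (low ≤ n) && decide (n ≤ high))).Pairwise
      ((· < ·) : Int → Int → Prop) :=
    List.Pairwise.filter _ (by decide)
  refine PySem.List.eq_of_perm_of_pairwise_le_of_injective (fun x : Int => x)
    (fun a b h => h) ?_ (hpw1.imp le_of_lt) (hpw2.imp le_of_lt)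
  refine (List.perm_ext_iff_of_nodup (hpw1.imp ne_of_lt) (hpw2.imp ne_of_lt)).mpr ?_
  intro a
  simp only [List.mem_filter, PySem.List.mem_pyRange_one, Bool.and_eq_true, decide_eq_true_eq]
  constructor
  · rintro ⟨⟨h1, h2⟩, h3⟩
    exact ⟨pvA_mem_clit a (by omega) h3, h1, by omega⟩
  · rintro ⟨h1, h2, h3⟩
    exact ⟨⟨h2, by omega⟩, pvClit_pvA a h1⟩

-- ===== VERDICT (by name: the statement is the Claim_ definition above) =====
theorem LeetCode1291_spec : Claim_unchanged_LeetCode1291 := by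
  intro low high _ hpre hnd
  show LeetCode1291 low high = LeetCode1291_alt low high
  rw [pvA_eq_filter, pvAlt_eq_filter]
  by_cases hhl : high < low
  · rw [PySem.List.pyRange_one_eq_nil (by omega), List.filter_nil]
    symm
    rw [List.filter_eq_nil_iff]
    intro n _
    simp only [Bool.and_eq_true, decide_eq_true_eq, not_and]
    omega
  · have hlow1 : 1 ≤ low := by
      have h0 : 0 ≤ low := by
        rcases hpre with h | h
        · omega
        · exact h
      rcases eq_or_lt_of_le h0 with h | h
      · exfalso
        exact hnd ⟨h.symm, by omega⟩
      · omega
    exact pvMain hlow1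

theorem LeetCode1291_changed : Claim_changed_LeetCode1291 := by
  unfold Claim_changed_LeetCode1291; decide

theorem LeetCode1291_tight : Claim_exact_LeetCode1291 := by
  intro low high _ _ hd heq
  obtain ⟨hl0, hh0⟩ := hd
  subst hl0
  have hmemA : (0 : Int) ∈ LeetCode1291 0 high := by
    rw [pvA_eq_filter]
    rw [List.mem_filter]
    exact ⟨PySem.List.mem_pyRange_one.mpr ⟨le_refl _, by omega⟩, by decide⟩
  rw [heq, pvAlt_eq_filter] at hmemA
  have : (0 : Int) ∈ pvClit := (List.mem_filter.mp hmemA).1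
  exact absurd this (by decide)
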